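-- pv_equiv track=rewrite | github.com/ReturnFI/Hysteria2 | core/scripts/warp/uninstall.py | reset_acl_inline
-- ===== SOURCE A (Python) =====
-- def reset_acl_inline(config: dict):
--     default = [
--         "reject(geosite:ir)", "reject(geoip:ir)",
--         "reject(geosite:category-ads-all)", "reject(geoip:private)",
--         "reject(geosite:google@ads)"
--     ]
--     updated = []
--     for item in config.get("acl", {}).get("inline", []):
--         if item in [
--             "warps(all)", "warps(geoip:google)", "warps(geosite:google)",
--             "warps(geosite:netflix)", "warps(geosite:spotify)",
--             "warps(geosite:openai)", "warps(geoip:openai)"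
--         ]:
--             updated.append("direct")
--         elif item == "warps(geosite:ir)":
--             updated.append("reject(geosite:ir)")
--         elif item == "warps(geoip:ir)":
--             updated.append("reject(geoip:ir)")
--         else:
--             updated.append(item)
--
--     final_inline = default + [i for i in updated if i not in default and i != "direct"]
--     config["acl"]["inline"] = final_inline
--     return config
-- ===== SOURCE B (Python) =====
-- _DEFAULT = [
--     "reject(geosite:ir)", "reject(geoip:ir)",
--     "reject(geosite:category-ads-all)", "reject(geoip:private)",
--     "reject(geosite:google@ads)"
-- ]
-- # Every item A rewrites is rewritten to "direct" or to a member of _DEFAULT, and the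
-- # final filter removes exactly "direct" and _DEFAULT members; so the whole
-- # substitution pass collapses into membership in one fixed blacklist.
-- _DROP = frozenset(_DEFAULT) | {
--     "direct",
--     "warps(all)", "warps(geoip:google)", "warps(geosite:google)",
--     "warps(geosite:netflix)", "warps(geosite:spotify)",
--     "warps(geosite:openai)", "warps(geoip:openai)",
--     "warps(geosite:ir)", "warps(geoip:ir)",
-- }
--
-- def reset_acl_inline(config: dict):
--     kept = [i for i in config.get("acl", {}).get("inline", []) if i not in _DROP]
--     config["acl"]["inline"] = _DEFAULT + kept
--     return config
-- ===== Notes on version B (the rewrite author's own statement) =====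
-- stated objective: simpler
-- what changed: B eliminates A's substitution pass entirely: since every value A rewrites (to 'direct' or a reject-ir string in the default list) is later dropped by the filter, B just filters the inline list once against a single fixed 15-string blacklist and prepends the defaults, with no mapping at all.
import Mathlib
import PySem

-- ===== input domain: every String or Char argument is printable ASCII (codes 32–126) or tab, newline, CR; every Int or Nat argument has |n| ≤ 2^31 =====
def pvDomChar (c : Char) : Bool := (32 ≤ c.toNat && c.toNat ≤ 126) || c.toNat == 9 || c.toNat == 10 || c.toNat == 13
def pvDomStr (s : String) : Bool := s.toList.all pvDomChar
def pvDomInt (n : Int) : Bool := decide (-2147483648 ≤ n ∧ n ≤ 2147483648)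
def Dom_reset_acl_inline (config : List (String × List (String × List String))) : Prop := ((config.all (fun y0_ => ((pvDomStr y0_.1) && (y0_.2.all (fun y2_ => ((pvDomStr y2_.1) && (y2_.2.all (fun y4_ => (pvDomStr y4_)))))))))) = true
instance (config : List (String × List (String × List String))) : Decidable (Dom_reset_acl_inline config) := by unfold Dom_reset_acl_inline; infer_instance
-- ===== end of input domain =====

-- B drops A's substitution pass entirely: every value A rewrites ends up removed by A's final
-- filter anyway, so B is a single filter against one fixed blacklist (objective 'simpler').
-- Both A and B mutate the input dict in place the same way; the proof is about the return value.

-- ===== PORT A =====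
def reset_acl_inline (config : List (String × List (String × List String))) : List (String × List (String × List String)) :=
  let defaultL : List String := ["reject(geosite:ir)", "reject(geoip:ir)",
    "reject(geosite:category-ads-all)", "reject(geoip:private)", "reject(geosite:google@ads)"]
  let inline := (PySem.Dict.mk ((PySem.Dict.mk config).getD "acl" [])).getD "inline" []
  let updated := inline.foldl (fun acc item =>
    acc ++ [if item ∈ ["warps(all)", "warps(geoip:google)", "warps(geosite:google)",
                       "warps(geosite:netflix)", "warps(geosite:spotify)",
                       "warps(geosite:openai)", "warps(geoip:openai)"] then "direct"
            else if item = "warps(geosite:ir)" then "reject(geosite:ir)"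
            else if item = "warps(geoip:ir)" then "reject(geoip:ir)"
            else item]) []
  let final := defaultL ++ updated.filter (fun i => decide (i ∉ defaultL) && decide (i ≠ "direct"))
  ((PySem.Dict.mk config).insert "acl"
     ((PySem.Dict.mk ((PySem.Dict.mk config).getD "acl" [])).insert "inline" final).items).items

-- ===== PORT B =====
def warpDefault : List String := ["reject(geosite:ir)", "reject(geoip:ir)",
  "reject(geosite:category-ads-all)", "reject(geoip:private)", "reject(geosite:google@ads)"]

-- frozenset(_DEFAULT) | {...}
def dropSet : PySem.Set String :=
  PySem.Set.union (PySem.Set.ofList warpDefault)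
    ["direct", "warps(all)", "warps(geoip:google)", "warps(geosite:google)",
     "warps(geosite:netflix)", "warps(geosite:spotify)", "warps(geosite:openai)",
     "warps(geoip:openai)", "warps(geosite:ir)", "warps(geoip:ir)"]

def reset_acl_inline_alt (config : List (String × List (String × List String))) : List (String × List (String × List String)) :=
  let kept := ((PySem.Dict.mk ((PySem.Dict.mk config).getD "acl" [])).getD "inline" []).filter
    (fun i => !(dropSet.contains i))
  ((PySem.Dict.mk config).insert "acl"
     ((PySem.Dict.mk ((PySem.Dict.mk config).getD "acl" [])).insert "inline" (warpDefault ++ kept)).items).items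

-- ===== PRECONDITION & SPEC =====
-- Pre_ excludes configs without an "acl" key: there A (config["acl"]) raises KeyError (B does too).
def Pre_reset_acl_inline (config : List (String × List (String × List String))) : Prop :=
  "acl" ∈ config.map Prod.fst
instance (config : List (String × List (String × List String))) : Decidable (Pre_reset_acl_inline config) := by unfold Pre_reset_acl_inline; infer_instance
def pvWitness_reset_acl_inline : (List (String × List (String × List String))) :=
  [("acl", [("inline", ["warps(all)", "foo", "warps(geoip:ir)"])])]
def Spec_reset_acl_inline (config : List (String × List (String × List String))) (out : List (String × List (String × List String))) : Prop := out = reset_acl_inline_alt config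
instance (config : List (String × List (String × List String))) (out : List (String × List (String × List String))) : Decidable (Spec_reset_acl_inline config out) := by unfold Spec_reset_acl_inline; infer_instance

-- ===== CLAIM =====
def Claim_equal_reset_acl_inline : Prop := ∀ (config : List (String × List (String × List String))), Dom_reset_acl_inline config → Pre_reset_acl_inline config → Spec_reset_acl_inline config (reset_acl_inline config)

-- ===== LEMMAS AND PROOFS =====

-- dropSet as a plain literal list
theorem dropSet_eval : dropSet =
    ["reject(geosite:ir)", "reject(geoip:ir)", "reject(geosite:category-ads-all)",
     "reject(geoip:private)", "reject(geosite:google@ads)", "direct", "warps(all)",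
     "warps(geoip:google)", "warps(geosite:google)", "warps(geosite:netflix)",
     "warps(geosite:spotify)", "warps(geosite:openai)", "warps(geoip:openai)",
     "warps(geosite:ir)", "warps(geoip:ir)"] := by decide

-- A's if/elif chain (as used in its port)
def chainA (s : String) : String :=
  if s ∈ ["warps(all)", "warps(geoip:google)", "warps(geosite:google)",
          "warps(geosite:netflix)", "warps(geosite:spotify)",
          "warps(geosite:openai)", "warps(geoip:openai)"] then "direct"
  else if s = "warps(geosite:ir)" then "reject(geosite:ir)"
  else if s = "warps(geoip:ir)" then "reject(geoip:ir)"
  else s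

-- outside the blacklist the chain is the identity
theorem chain_id_aux (s : String)
    (h6 : s ≠ "warps(all)") (h7 : s ≠ "warps(geoip:google)") (h8 : s ≠ "warps(geosite:google)")
    (h9 : s ≠ "warps(geosite:netflix)") (h10 : s ≠ "warps(geosite:spotify)")
    (h11 : s ≠ "warps(geosite:openai)") (h12 : s ≠ "warps(geoip:openai)")
    (h13 : s ≠ "warps(geosite:ir)") (h14 : s ≠ "warps(geoip:ir)") : chainA s = s := by
  simp [chainA, h6, h7, h8, h9, h10, h11, h12, h13, h14]

-- A's filter test on the mapped value equals B's blacklist test on the raw value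
theorem chain_filter_eq (s : String) :
    (decide (chainA s ∉ warpDefault) && decide (chainA s ≠ "direct")) = !(dropSet.contains s) := by
  by_cases h0 : s = "reject(geosite:ir)"
  · subst h0; decide
  by_cases h1 : s = "reject(geoip:ir)"
  · subst h1; decide
  by_cases h2 : s = "reject(geosite:category-ads-all)"
  · subst h2; decide
  by_cases h3 : s = "reject(geoip:private)"
  · subst h3; decide
  by_cases h4 : s = "reject(geosite:google@ads)"
  · subst h4; decide
  by_cases h5 : s = "direct"
  · subst h5; decide
  by_cases h6 : s = "warps(all)"
  · subst h6; decide
  by_cases h7 : s = "warps(geoip:google)"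
  · subst h7; decide
  by_cases h8 : s = "warps(geosite:google)"
  · subst h8; decide
  by_cases h9 : s = "warps(geosite:netflix)"
  · subst h9; decide
  by_cases h10 : s = "warps(geosite:spotify)"
  · subst h10; decide
  by_cases h11 : s = "warps(geosite:openai)"
  · subst h11; decide
  by_cases h12 : s = "warps(geoip:openai)"
  · subst h12; decide
  by_cases h13 : s = "warps(geosite:ir)"
  · subst h13; decide
  by_cases h14 : s = "warps(geoip:ir)"
  · subst h14; decide
  have hc : dropSet.contains s = false := by
    rw [dropSet_eval]
    simp [PySem.Set.contains_eq_listContains, h0, h1, h2, h3, h4, h5, h6, h7, h8, h9, h10, h11, h12, h13, h14]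
  rw [hc]
  rw [chain_id_aux s h6 h7 h8 h9 h10 h11 h12 h13 h14]
  simp [warpDefault, h0, h1, h2, h3, h4, h5]

theorem chain_id (s : String) (h : dropSet.contains s = false) : chainA s = s := by
  rw [dropSet_eval] at h
  simp [PySem.Set.contains_eq_listContains] at h
  obtain ⟨h0, h1, h2, h3, h4, h5, h6, h7, h8, h9, h10, h11, h12, h13, h14⟩ := h
  exact chain_id_aux s h6 h7 h8 h9 h10 h11 h12 h13 h14

-- the map-then-filter of A equals B's single blacklist filter
theorem mapped_filter_eq (l : List String) :
    (l.map chainA).filter (fun i => decide (i ∉ warpDefault) && decide (i ≠ "direct"))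
      = l.filter (fun i => !(dropSet.contains i)) := by
  rw [List.filter_map]
  have h1 : l.filter ((fun i => decide (i ∉ warpDefault) && decide (i ≠ "direct")) ∘ chainA)
      = l.filter (fun i => !(dropSet.contains i)) :=
    List.filter_congr (fun x _ => chain_filter_eq x)
  rw [h1]
  have h2 : ∀ x ∈ l.filter (fun i => !(dropSet.contains i)), chainA x = x := by
    intro x hx
    have := List.of_mem_filter hx
    exact chain_id x (by simpa using this)
  rw [List.map_congr_left h2]; simp


-- ===== VERDICT =====
theorem reset_acl_inline_spec : Claim_equal_reset_acl_inline := by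
  intro config _ _
  unfold Spec_reset_acl_inline reset_acl_inline reset_acl_inline_alt
  have e : (fun (item : String) =>
      if item ∈ ["warps(all)", "warps(geoip:google)", "warps(geosite:google)",
                 "warps(geosite:netflix)", "warps(geosite:spotify)",
                 "warps(geosite:openai)", "warps(geoip:openai)"] then "direct"
      else if item = "warps(geosite:ir)" then "reject(geosite:ir)"
      else if item = "warps(geoip:ir)" then "reject(geoip:ir)"
      else item) = chainA := rfl
  simp only [PySem.List.foldl_append_singleton_eq_map, List.nil_append, e]
  rw [show (["reject(geosite:ir)", "reject(geoip:ir)", "reject(geosite:category-ads-all)",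
    "reject(geoip:private)", "reject(geosite:google@ads)"] : List String) = warpDefault from rfl]
  rw [mapped_filter_eq]
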